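-- pv_equiv track=rewrite | github.com/Lrrr908/planisphaerium | map_generation.py | find_grass_near_water
-- ===== SOURCE A (Python) =====
-- def tile_is_grass(tv):
--     return tv == 1
--
-- def tile_is_water(tv):
--     return tv == 2  # ONLY regular water
--
-- def find_grass_near_water(map_data):
--     height = len(map_data)
--     width = len(map_data[0])
--     near_water=set()
--     for y in range(height):
--         for x in range(width):
--             if tile_is_grass(map_data[y][x]):
--                 for dy in [-1,0,1]:
--                     for dx in [-1,0,1]:
--                         nx = x+dx
--                         ny = y+dy
--                         if 0<=nx<width and 0<=ny<height:
--                             if tile_is_water(map_data[ny][nx]):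
--                                 near_water.add((x,y))
--                                 break
--     return near_water
-- ===== SOURCE B (Python) =====
-- def find_grass_near_water(map_data):
--     height = len(map_data)
--     width = len(map_data[0])
--     grid = [row[:width] for row in map_data]  # the grid is as wide as its first row
--     # horizontal pass: row_has_water[y][x] == True iff row y has water in columns x-1..x+1
--     row_has_water = [[any(v == 2 for v in row[max(0, x - 1):x + 2]) for x in range(width)]
--                      for row in grid]
--     near_water = set()
--     for y in range(height):
--         # vertical pass: band[x] == True iff some row y-1..y+1 has water in columns x-1..x+1
--         band = [any(row_has_water[yy][x] for yy in range(max(0, y - 1), min(height, y + 2)))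
--                 for x in range(width)]
--         for x in range(width):
--             if map_data[y][x] == 1 and band[x]:
--                 near_water.add((x, y))
--     return near_water
-- ===== Notes on version B (the rewrite author's own statement) =====
-- stated objective: alternative
-- what changed: A gathers: for each grass cell it scans its 3x3 neighborhood for water with nested dy/dx loops and a break; B instead precomputes a separable dilation of the water mask (a horizontal any-pass per row, then a vertical any-pass over bands of three rows) and then marks grass cells where the dilated mask is true.
import Mathlib
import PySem

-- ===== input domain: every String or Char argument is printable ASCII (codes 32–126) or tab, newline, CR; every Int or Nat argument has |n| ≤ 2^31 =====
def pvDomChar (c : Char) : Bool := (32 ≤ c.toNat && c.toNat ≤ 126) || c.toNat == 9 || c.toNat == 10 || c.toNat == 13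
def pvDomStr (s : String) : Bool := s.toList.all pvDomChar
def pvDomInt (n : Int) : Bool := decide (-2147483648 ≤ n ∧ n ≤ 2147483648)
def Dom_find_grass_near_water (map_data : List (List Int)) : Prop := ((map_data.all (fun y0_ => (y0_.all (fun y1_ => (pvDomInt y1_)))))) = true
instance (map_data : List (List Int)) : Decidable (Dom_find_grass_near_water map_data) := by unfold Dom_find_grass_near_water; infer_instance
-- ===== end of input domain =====

-- B changes the algorithm from a per-grass-cell 3x3 gather to a two-pass separable
-- dilation of the water mask (objective: alternative; same asymptotic cost).

-- ===== PORT A =====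
def tile_is_grass (tv : Int) : Bool := tv == 1

def tile_is_water (tv : Int) : Bool := tv == 2

-- the inner 'for dx in [-1,0,1]: … break' loop: true at the first in-bounds water neighbor
def aDxScan (map_data : List (List Int)) (w h x y dy : Int) : List Int → Bool
  | [] => false
  | dx :: rest =>
      let nx := x + dx
      let ny := y + dy
      if 0 ≤ nx ∧ nx < w ∧ 0 ≤ ny ∧ ny < h then
        if tile_is_water (PySem.List.pyGetD (PySem.List.pyGetD map_data ny []) nx 0) then true
        else aDxScan map_data w h x y dy rest
      else aDxScan map_data w h x y dy rest

def find_grass_near_water (map_data : List (List Int)) : List (Int × Int) :=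
  let height : Int := map_data.length
  let width : Int := (PySem.List.pyGetD map_data 0 []).length
  (PySem.List.pyRange 0 height 1).foldl (fun s y =>
    (PySem.List.pyRange 0 width 1).foldl (fun s x =>
      if tile_is_grass (PySem.List.pyGetD (PySem.List.pyGetD map_data y []) x 0) then
        ([-1, 0, 1] : List Int).foldl (fun s dy =>
          if aDxScan map_data width height x y dy [-1, 0, 1] then PySem.Set.add s (x, y) else s) s
      else s) s) ([] : PySem.Set (Int × Int))

-- ===== PORT B =====
-- horizontal pass: for each row, whether columns x-1..x+1 of that row contain water
def bRowHasWater (width : Int) (row : List Int) : List Bool :=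
  (PySem.List.pyRange 0 width 1).map (fun x =>
    (PySem.List.slice row (some (max 0 (x - 1))) (some (x + 2))).any (fun v => v == 2))

def find_grass_near_water_alt (map_data : List (List Int)) : List (Int × Int) :=
  let height : Int := map_data.length
  let width : Int := (PySem.List.pyGetD map_data 0 []).length
  let grid := map_data.map (fun row => PySem.List.slice row none (some width))
  let row_has_water := grid.map (bRowHasWater width)
  (PySem.List.pyRange 0 height 1).foldl (fun s y =>
    -- vertical pass: any of rows y-1..y+1 has water near column x
    let band := (PySem.List.pyRange 0 width 1).map (fun x =>
      (PySem.List.pyRange (max 0 (y - 1)) (min height (y + 2)) 1).any (fun yy =>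
        PySem.List.pyGetD (PySem.List.pyGetD row_has_water yy []) x false))
    (PySem.List.pyRange 0 width 1).foldl (fun s x =>
      if (PySem.List.pyGetD (PySem.List.pyGetD map_data y []) x 0 == 1)
          && PySem.List.pyGetD band x false then
        PySem.Set.add s (x, y)
      else s) s) ([] : PySem.Set (Int × Int))

-- ===== PRECONDITION & SPEC =====
-- Pre_ excludes exactly the inputs on which A raises IndexError: the empty grid
-- (map_data[0] fails) and grids with a row shorter than the first row (the cell
-- scan indexes every column 0..width-1 of every row).
def Pre_find_grass_near_water (map_data : List (List Int)) : Prop :=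
  map_data ≠ [] ∧ ∀ row ∈ map_data, (map_data.headD []).length ≤ row.length
instance (map_data : List (List Int)) : Decidable (Pre_find_grass_near_water map_data) := by
  unfold Pre_find_grass_near_water; infer_instance

def pvWitness_find_grass_near_water : List (List Int) := [[1, 0], [2, 1]]

def Spec_find_grass_near_water (map_data : List (List Int)) (out : List (Int × Int)) : Prop := out = find_grass_near_water_alt map_data
instance (map_data : List (List Int)) (out : List (Int × Int)) : Decidable (Spec_find_grass_near_water map_data out) := by unfold Spec_find_grass_near_water; infer_instance

-- ===== CLAIM (what is proved, stated in full; the proofs are below) =====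
def Claim_equal_find_grass_near_water : Prop := ∀ (map_data : List (List Int)), Dom_find_grass_near_water map_data → Pre_find_grass_near_water map_data → Spec_find_grass_near_water map_data (find_grass_near_water map_data)

-- ===== LEMMAS AND PROOFS =====

-- the canonical "cell (x,y) has an in-bounds water neighbor" proposition
def NW (map_data : List (List Int)) (w h x y : Int) : Prop :=
  ∃ ny nx : Int, y - 1 ≤ ny ∧ ny ≤ y + 1 ∧ x - 1 ≤ nx ∧ nx ≤ x + 1 ∧
    0 ≤ ny ∧ ny < h ∧ 0 ≤ nx ∧ nx < w ∧
    PySem.List.pyGetD (PySem.List.pyGetD map_data ny []) nx 0 = 2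

theorem aDxScan_iff (m : List (List Int)) (w h x y dy : Int) (L : List Int) :
    aDxScan m w h x y dy L = true ↔
      ∃ dx ∈ L, (0 ≤ x + dx ∧ x + dx < w ∧ 0 ≤ y + dy ∧ y + dy < h) ∧
        PySem.List.pyGetD (PySem.List.pyGetD m (y + dy) []) (x + dx) 0 = 2 := by
  induction L with
  | nil => simp [aDxScan]
  | cons dx rest ih =>
    simp only [aDxScan, tile_is_water]
    split_ifs with h1 h2
    · simp_all
    · simp_all
    · simp_all

-- collapse the dy-loop of conditional adds to one conditional add
theorem dyFold_collapse (c : Int → Bool) (s : PySem.Set (Int × Int)) (p : Int × Int) :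
    ([-1, 0, 1] : List Int).foldl (fun s dy => if c dy then PySem.Set.add s p else s) s =
      if c (-1) || c 0 || c 1 then PySem.Set.add s p else s := by
  simp only [List.foldl]
  by_cases h1 : c (-1) <;> by_cases h2 : c 0 <;> by_cases h3 : c 1 <;>
    simp [h1, h2, h3]

-- A's per-cell neighbor test agrees with NW
theorem condA_iff (m : List (List Int)) (w h x y : Int) :
    (aDxScan m w h x y (-1) [-1, 0, 1] || aDxScan m w h x y 0 [-1, 0, 1] ||
      aDxScan m w h x y 1 [-1, 0, 1]) = true ↔ NW m w h x y := by
  simp only [Bool.or_eq_true, aDxScan_iff, NW]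
  constructor
  · rintro ((⟨dx, hdx, ⟨b1, b2, b3, b4⟩, hw⟩ | ⟨dx, hdx, ⟨b1, b2, b3, b4⟩, hw⟩) |
      ⟨dx, hdx, ⟨b1, b2, b3, b4⟩, hw⟩) <;>
    · refine ⟨_, _, ?_, ?_, ?_, ?_, b3, b4, b1, b2, hw⟩ <;>
        (simp only [List.mem_cons, List.not_mem_nil, or_false] at hdx; omega)
  · rintro ⟨ny, nx, h1, h2, h3, h4, h5, h6, h7, h8, hw⟩
    have hy : ny = y + (-1) ∨ ny = y + 0 ∨ ny = y + 1 := by omega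
    rcases hy with hy | hy | hy <;> subst hy
    · left; left
      exact ⟨nx - x, by simp only [List.mem_cons]; omega,
        ⟨by omega, by omega, h5, h6⟩, by rw [show x + (nx - x) = nx by ring]; exact hw⟩
    · left; right
      exact ⟨nx - x, by simp only [List.mem_cons]; omega,
        ⟨by omega, by omega, h5, h6⟩, by rw [show x + (nx - x) = nx by ring]; exact hw⟩
    · right
      exact ⟨nx - x, by simp only [List.mem_cons]; omega,
        ⟨by omega, by omega, h5, h6⟩, by rw [show x + (nx - x) = nx by ring]; exact hw⟩

-- the horizontal pass, characterized: entry x of bRowHasWater is "water within cols x-1..x+1"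
theorem bRowHasWater_iff (w : Int) (row : List Int) (x : Int)
    (hx0 : 0 ≤ x) (hxw : x < w) (hrw : (row.length : Int) = w) :
    PySem.List.pyGetD (bRowHasWater w row) x false = true ↔
      ∃ nx : Int, x - 1 ≤ nx ∧ nx ≤ x + 1 ∧ 0 ≤ nx ∧ nx < w ∧
        PySem.List.pyGetD row nx 0 = 2 := by
  unfold bRowHasWater
  rw [PySem.List.pyGetD_map_pyRange_of_nonneg _ _ _ _ hx0 hxw]
  have ha0 : (0 : Int) ≤ max 0 (x - 1) := le_max_left _ _
  have hb0 : (0 : Int) ≤ x + 2 := by omega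
  rw [PySem.List.slice_toNat row ha0 hb0]
  have haI : (((max 0 (x - 1)).toNat : Int)) = max 0 (x - 1) := Int.toNat_of_nonneg ha0
  have hbI : (((x + 2).toNat : Int)) = x + 2 := Int.toNat_of_nonneg hb0
  rw [List.any_eq_true]
  constructor
  · rintro ⟨v, hv, hv2⟩
    have hv2' : v = 2 := by simpa using hv2
    subst hv2'
    obtain ⟨i, hi, hgi⟩ := List.mem_iff_getElem.mp hv
    have hi' : i < min ((x + 2).toNat - (max 0 (x - 1)).toNat) (row.length - (max 0 (x - 1)).toNat) := by
      simpa [List.length_take, List.length_drop] using hi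
    rw [List.getElem_take, List.getElem_drop] at hgi
    refine ⟨(((max 0 (x - 1)).toNat + i : Nat) : Int), ?_, ?_, by positivity, ?_, ?_⟩
    · push_cast; omega
    · push_cast; omega
    · push_cast; omega
    · rw [PySem.List.pyGetD_natCast]
      rw [List.getD_eq_getElem _ _ (by omega)]
      exact hgi
  · rintro ⟨nx, h1, h2, h3, h4, hw⟩
    have hnlen : nx.toNat < row.length := by omega
    have hwn : row[nx.toNat] = 2 := by
      have := PySem.List.pyGetD_eq_getElem row (i := nx) 0 h3 (by omega)
      rw [this] at hw; exact hw
    have hidx : (max 0 (x - 1)).toNat + (nx.toNat - (max 0 (x - 1)).toNat) = nx.toNat := by omega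
    refine ⟨2, ?_, by simp⟩
    rw [List.mem_iff_getElem]
    refine ⟨nx.toNat - (max 0 (x - 1)).toNat, ?_, ?_⟩
    · simp only [List.length_take, List.length_drop]; omega
    · rw [List.getElem_take, List.getElem_drop,
        ← List.getD_eq_getElem row 0 (by omega), hidx,
        List.getD_eq_getElem row 0 hnlen]
      exact hwn

theorem pyGetD_take_eq (row : List Int) (k : Nat) (nx : Int)
    (h0 : 0 ≤ nx) (hk : nx < (k : Int)) (hlen : nx < (row.length : Int)) :
    PySem.List.pyGetD (row.take k) nx 0 = PySem.List.pyGetD row nx 0 := by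
  rw [PySem.List.pyGetD_eq_getElem _ _ h0 (by simp [List.length_take]; omega),
    PySem.List.pyGetD_eq_getElem _ _ h0 hlen, List.getElem_take]

-- B's per-cell band lookup agrees with NW
theorem condB_iff (m : List (List Int)) (w h x y : Int)
    (hy0 : 0 ≤ y) (hyh : y < h) (hx0 : 0 ≤ x) (hxw : x < w)
    (hh : (m.length : Int) = h) (hge : ∀ row ∈ m, w ≤ (row.length : Int)) :
    PySem.List.pyGetD
      ((PySem.List.pyRange 0 w 1).map (fun x =>
        (PySem.List.pyRange (max 0 (y - 1)) (min h (y + 2)) 1).any (fun yy =>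
          PySem.List.pyGetD
            (PySem.List.pyGetD ((m.map (fun row => PySem.List.slice row none (some w))).map (bRowHasWater w)) yy [])
            x false)))
      x false = true ↔ NW m w h x y := by
  have hw0 : (0 : Int) ≤ w := by omega
  rw [PySem.List.pyGetD_map_pyRange_of_nonneg _ _ _ _ hx0 hxw]
  rw [List.any_eq_true]
  unfold NW
  constructor
  · rintro ⟨yy, hyy, hb⟩
    rw [PySem.List.mem_pyRange_one] at hyy
    have hyy0 : 0 ≤ yy := le_trans (le_max_left _ _) hyy.1
    have hyyh : yy < h := lt_of_lt_of_le hyy.2 (min_le_left _ _)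
    have hyylen : yy < (m.length : Int) := by omega
    rw [PySem.List.pyGetD_eq_getElem ((m.map (fun row => PySem.List.slice row none (some w))).map (bRowHasWater w))
      (i := yy) [] hyy0 (by simpa using hyylen), List.getElem_map, List.getElem_map] at hb
    have hgerow : w ≤ (m[yy.toNat].length : Int) := hge _ (List.getElem_mem _)
    rw [PySem.List.slice_to _ hw0] at hb
    have hrow : ((m[yy.toNat].take w.toNat).length : Int) = w := by
      simp [List.length_take]; omega
    rw [bRowHasWater_iff w _ x hx0 hxw hrow] at hb
    obtain ⟨nx, n1, n2, n3, n4, nw⟩ := hb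
    rw [pyGetD_take_eq _ _ _ n3 (by omega) (by omega)] at nw
    refine ⟨yy, nx, ?_, ?_, n1, n2, hyy0, hyyh, n3, n4, ?_⟩
    · have := hyy.1; omega
    · have := hyy.2; omega
    · rw [PySem.List.pyGetD_eq_getElem m (i := yy) [] hyy0 hyylen]
      exact nw
  · rintro ⟨ny, nx, h1, h2, h3, h4, h5, h6, h7, h8, hw⟩
    have hnylen : ny < (m.length : Int) := by omega
    refine ⟨ny, ?_, ?_⟩
    · rw [PySem.List.mem_pyRange_one]
      constructor
      · exact max_le (by omega) (by omega)
      · exact lt_min (by omega) (by omega)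
    · rw [PySem.List.pyGetD_eq_getElem ((m.map (fun row => PySem.List.slice row none (some w))).map (bRowHasWater w))
        (i := ny) [] h5 (by simpa using hnylen), List.getElem_map, List.getElem_map]
      have hgerow : w ≤ (m[ny.toNat].length : Int) := hge _ (List.getElem_mem _)
      rw [PySem.List.slice_to _ hw0]
      have hrow : ((m[ny.toNat].take w.toNat).length : Int) = w := by
        simp [List.length_take]; omega
      rw [bRowHasWater_iff w _ x hx0 hxw hrow]
      refine ⟨nx, h3, h4, h7, h8, ?_⟩
      rw [pyGetD_take_eq _ _ _ h7 (by omega) (by omega)]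
      rw [PySem.List.pyGetD_eq_getElem m (i := ny) [] h5 hnylen] at hw
      exact hw

theorem pyGetD_zero_headD {α : Type} (xs : List α) (d : α) :
    PySem.List.pyGetD xs 0 d = (xs.headD d) := by
  have : ((0 : Nat) : Int) = (0 : Int) := rfl
  rw [← this, PySem.List.pyGetD_natCast]
  cases xs <;> rfl

theorem find_grass_near_water_spec : Claim_equal_find_grass_near_water := by
  intro m _ hpre
  unfold Spec_find_grass_near_water find_grass_near_water find_grass_near_water_alt
  obtain ⟨hne, hgeN⟩ := hpre
  set h : Int := (m.length : Int) with hh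
  set w : Int := ((PySem.List.pyGetD m 0 []).length : Int) with hwdef
  have hhead : PySem.List.pyGetD m 0 [] = m.headD [] := pyGetD_zero_headD m []
  have hge : ∀ row ∈ m, w ≤ (row.length : Int) := by
    intro row hr
    rw [hwdef, hhead]
    exact_mod_cast hgeN row hr
  apply PySem.List.foldl_congr_mem
  intro s y hy
  rw [PySem.List.mem_pyRange_one] at hy
  apply PySem.List.foldl_congr_mem
  intro acc x hx
  rw [PySem.List.mem_pyRange_one] at hx
  simp only [tile_is_grass]
  rw [dyFold_collapse (fun dy => aDxScan m w h x y dy [-1, 0, 1]) acc (x, y)]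
  have hcond :
      (aDxScan m w h x y (-1) [-1, 0, 1] || aDxScan m w h x y 0 [-1, 0, 1] ||
        aDxScan m w h x y 1 [-1, 0, 1]) =
      PySem.List.pyGetD
        ((PySem.List.pyRange 0 w 1).map (fun x =>
          (PySem.List.pyRange (max 0 (y - 1)) (min h (y + 2)) 1).any (fun yy =>
            PySem.List.pyGetD
            (PySem.List.pyGetD ((m.map (fun row => PySem.List.slice row none (some w))).map (bRowHasWater w)) yy [])
            x false)))
        x false := by
    rw [Bool.eq_iff_iff]
    rw [condA_iff, condB_iff m w h x y hy.1 hy.2 hx.1 hx.2 rfl hge]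
  rw [← hcond]
  by_cases hg : (PySem.List.pyGetD (PySem.List.pyGetD m y []) x 0 == 1) = true <;>
    simp [hg]
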